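-- pv_equiv track=rewrite | github.com/houda-aitmouch/DelayPropagation | src/optimizer.py | is_aircraft_allowed_for_route
-- ===== SOURCE A (Python) =====
-- from typing import Optional
--
-- def _norm_airport(value) -> str:
--     return str(value).strip().upper() if value is not None else ""
--
-- def is_airport_authorized(
--         msn: str,
--         aircraft_type: str,
--         airport: str,
--         authorizations: dict,
--         fallback_allowed: Optional[set] = None,
-- ) -> tuple[bool, str]:
--     """
--     Vérifie si un avion (par immatriculation, puis par type) est autorisé
--     sur un aéroport donné.
--
--     Priorité :
--       1. by_msn  (immatriculation — plus précis)
--       2. by_type (type avion — moins précis)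
--       3. fallback (planning opérationnel)
--       4. Mode permissif si aucune info
--     """
--     msn_norm     = str(msn).strip().upper()
--     type_norm    = str(aircraft_type).strip().upper()
--     airport_norm = _norm_airport(airport)
--
--     # 1. Par immatriculation
--     if msn_norm in authorizations.get("by_msn", {}):
--         allowed = authorizations["by_msn"][msn_norm]
--         if airport_norm in allowed:
--             return True, f"Autorisé par immatriculation ({msn_norm})"
--         return False, (
--             f"Aéroport {airport_norm} NON autorisé pour {msn_norm} "
--             f"[autorisés: {', '.join(sorted(allowed))}]"
--         )
--
--     # 2. Par type
--     if type_norm in authorizations.get("by_type", {}):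
--         allowed = authorizations["by_type"][type_norm]
--         if airport_norm in allowed:
--             return True, f"Autorisé par type ({type_norm})"
--         return False, (
--             f"Aéroport {airport_norm} NON autorisé pour type {type_norm} "
--             f"[autorisés: {', '.join(sorted(allowed))}]"
--         )
--
--     # 3. Fallback planning
--     if fallback_allowed is not None:
--         if airport_norm in fallback_allowed:
--             return True, "Autorisé par planning (fallback)"
--         return False, f"Aéroport {airport_norm} absent du planning pour type {type_norm}"
--
--     # 4. Pas d'info → permissif
--     return True, "Pas de restriction définie"
--
-- def is_aircraft_allowed_for_route(
--         msn: str,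
--         aircraft_type: str,
--         airports: set,
--         authorizations: dict,
--         fallback_allowed: Optional[set] = None,
-- ) -> tuple[bool, str]:
--     """
--     NOUVEAU — Vérifie qu'un avion est autorisé sur TOUS les aéroports
--     d'une liste (séquence de vols complète).
--
--     Remplace les boucles `for airport in airports: is_airport_authorized()`
--     dispersées dans le code.
--
--     Paramètres :
--         msn             : immatriculation de l'avion (ex: "CNRGK")
--         aircraft_type   : type avion (ex: "73H")
--         airports        : ensemble d'aéroports à vérifier
--         authorizations  : dict chargé par load_aircraft_authorizations()
--         fallback_allowed: aéroports du planning pour ce type (fallback)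
--
--     Retourne :
--         (True,  "")           si tous les aéroports sont autorisés
--         (False, raison)       dès le premier aéroport non autorisé
--     """
--     for apt in sorted(airports):               # tri pour logs déterministes
--         ok, reason = is_airport_authorized(
--             msn=msn,
--             aircraft_type=aircraft_type,
--             airport=apt,
--             authorizations=authorizations,
--             fallback_allowed=fallback_allowed,
--         )
--         if not ok:
--             return False, reason
--     return True, ""
-- ===== SOURCE B (Python) =====
-- from typing import Optional
--
--
-- def _norm_airport(value) -> str:
--     return str(value).strip().upper() if value is not None else ""
--
--
-- def is_aircraft_allowed_for_route(
--         msn: str,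
--         aircraft_type: str,
--         airports: set,
--         authorizations: dict,
--         fallback_allowed: Optional[set] = None,
-- ) -> tuple[bool, str]:
--     """Resolve the authorization mode once, then find the smallest failing
--     airport with a single scan + min() instead of sorting the whole set."""
--     msn_norm = str(msn).strip().upper()
--     type_norm = str(aircraft_type).strip().upper()
--     by_msn = authorizations.get("by_msn", {})
--     by_type = authorizations.get("by_type", {})
--
--     if msn_norm in by_msn:
--         allowed = by_msn[msn_norm]
--         reason = lambda a: (
--             f"Aéroport {a} NON autorisé pour {msn_norm} "
--             f"[autorisés: {', '.join(sorted(allowed))}]"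
--         )
--     elif type_norm in by_type:
--         allowed = by_type[type_norm]
--         reason = lambda a: (
--             f"Aéroport {a} NON autorisé pour type {type_norm} "
--             f"[autorisés: {', '.join(sorted(allowed))}]"
--         )
--     elif fallback_allowed is not None:
--         allowed = fallback_allowed
--         reason = lambda a: f"Aéroport {a} absent du planning pour type {type_norm}"
--     else:
--         return True, ""  # permissive: no info at all
--
--     bad = [apt for apt in airports if _norm_airport(apt) not in allowed]
--     if bad:
--         return False, reason(_norm_airport(min(bad)))
--     return True, ""
-- ===== Notes on version B (the rewrite author's own statement) =====
-- stated objective: alternative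
-- what changed: B resolves the authorization mode (by_msn / by_type / fallback / permissive) once instead of per airport, and finds the first failing airport as min() of a single filtering pass instead of sorting the whole set and scanning it with early return.
import Mathlib
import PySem

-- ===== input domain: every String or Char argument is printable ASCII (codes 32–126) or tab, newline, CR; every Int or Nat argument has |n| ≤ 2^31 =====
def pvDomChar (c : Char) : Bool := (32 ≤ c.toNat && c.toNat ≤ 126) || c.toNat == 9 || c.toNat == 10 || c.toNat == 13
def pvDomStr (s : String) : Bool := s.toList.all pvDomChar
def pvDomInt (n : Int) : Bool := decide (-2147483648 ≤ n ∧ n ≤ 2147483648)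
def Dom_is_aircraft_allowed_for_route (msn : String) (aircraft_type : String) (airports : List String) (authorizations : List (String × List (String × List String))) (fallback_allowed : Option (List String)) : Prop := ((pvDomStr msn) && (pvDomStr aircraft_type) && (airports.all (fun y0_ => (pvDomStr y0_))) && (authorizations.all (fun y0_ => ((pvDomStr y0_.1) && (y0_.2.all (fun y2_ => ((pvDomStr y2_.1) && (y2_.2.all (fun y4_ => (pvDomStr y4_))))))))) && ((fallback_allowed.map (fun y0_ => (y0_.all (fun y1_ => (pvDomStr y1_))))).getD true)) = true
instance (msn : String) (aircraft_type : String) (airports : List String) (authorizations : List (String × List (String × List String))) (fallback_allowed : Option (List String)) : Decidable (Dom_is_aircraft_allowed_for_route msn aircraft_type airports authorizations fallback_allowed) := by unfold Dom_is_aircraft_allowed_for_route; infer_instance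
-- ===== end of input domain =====

-- B resolves the authorization mode once and finds the smallest failing airport with one
-- filter + min() instead of per-airport mode resolution over the fully sorted set (alternative decomposition).

-- ===== PORT A =====
-- module helper _norm_airport (its argument is always a str here, never None)
def pvNormAirport (value : String) : String := PySem.Str.upper (PySem.Str.strip value)

-- literal port of is_airport_authorized
def pvIsAirportAuthorized (msn aircraft_type airport : String)
    (authorizations : List (String × List (String × List String)))
    (fallback_allowed : Option (List String)) : Bool × String :=
  let msn_norm := PySem.Str.upper (PySem.Str.strip msn)
  let type_norm := PySem.Str.upper (PySem.Str.strip aircraft_type)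
  let airport_norm := pvNormAirport airport
  let auth := PySem.Dict.ofList authorizations
  -- 1. Par immatriculation
  let by_msn := PySem.Dict.ofList (auth.getD "by_msn" [])
  if by_msn.contains msn_norm then
    let allowed := by_msn.getD msn_norm []
    if allowed.contains airport_norm then
      (true, "Autorisé par immatriculation (" ++ msn_norm ++ ")")
    else
      (false, "Aéroport " ++ airport_norm ++ " NON autorisé pour " ++ msn_norm ++
        " [autorisés: " ++ PySem.Str.join ", " (PySem.List.sorted allowed (fun x => x)) ++ "]")
  else
    -- 2. Par type
    let by_type := PySem.Dict.ofList (auth.getD "by_type" [])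
    if by_type.contains type_norm then
      let allowed := by_type.getD type_norm []
      if allowed.contains airport_norm then
        (true, "Autorisé par type (" ++ type_norm ++ ")")
      else
        (false, "Aéroport " ++ airport_norm ++ " NON autorisé pour type " ++ type_norm ++
          " [autorisés: " ++ PySem.Str.join ", " (PySem.List.sorted allowed (fun x => x)) ++ "]")
    else
      -- 3. Fallback planning
      match fallback_allowed with
      | some fb =>
          if fb.contains airport_norm then (true, "Autorisé par planning (fallback)")
          else (false, "Aéroport " ++ airport_norm ++ " absent du planning pour type " ++ type_norm)
      -- 4. Pas d'info → permissif
      | none => (true, "Pas de restriction définie")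

-- the 'for apt in sorted(airports)' loop with early return
def pvRouteLoop (msn aircraft_type : String)
    (authorizations : List (String × List (String × List String)))
    (fallback_allowed : Option (List String)) : List String → Bool × String
  | [] => (true, "")
  | apt :: rest =>
      let r := pvIsAirportAuthorized msn aircraft_type apt authorizations fallback_allowed
      if !r.1 then (false, r.2)
      else pvRouteLoop msn aircraft_type authorizations fallback_allowed rest

def is_aircraft_allowed_for_route (msn : String) (aircraft_type : String) (airports : List String) (authorizations : List (String × List (String × List String))) (fallback_allowed : Option (List String)) : Bool × String :=
  pvRouteLoop msn aircraft_type authorizations fallback_allowed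
    (PySem.List.sorted airports (fun x => x))

-- ===== PORT B =====
-- bad = [apt for apt in airports if _norm_airport(apt) not in allowed]; first failure = min(bad)
def pvFirstBad (airports allowed : List String) (reason : String → String) : Bool × String :=
  let bad := airports.filter (fun apt => !allowed.contains (pvNormAirport apt))
  match PySem.List.min? bad (fun x => x) with
  | some m => (false, reason (pvNormAirport m))
  | none => (true, "")

def is_aircraft_allowed_for_route_alt (msn : String) (aircraft_type : String) (airports : List String) (authorizations : List (String × List (String × List String))) (fallback_allowed : Option (List String)) : Bool × String :=
  let msn_norm := PySem.Str.upper (PySem.Str.strip msn)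
  let type_norm := PySem.Str.upper (PySem.Str.strip aircraft_type)
  let auth := PySem.Dict.ofList authorizations
  let by_msn := PySem.Dict.ofList (auth.getD "by_msn" [])
  let by_type := PySem.Dict.ofList (auth.getD "by_type" [])
  if by_msn.contains msn_norm then
    pvFirstBad airports (by_msn.getD msn_norm []) (fun a =>
      "Aéroport " ++ a ++ " NON autorisé pour " ++ msn_norm ++ " [autorisés: " ++
      PySem.Str.join ", " (PySem.List.sorted (by_msn.getD msn_norm []) (fun x => x)) ++ "]")
  else if by_type.contains type_norm then
    pvFirstBad airports (by_type.getD type_norm []) (fun a =>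
      "Aéroport " ++ a ++ " NON autorisé pour type " ++ type_norm ++ " [autorisés: " ++
      PySem.Str.join ", " (PySem.List.sorted (by_type.getD type_norm []) (fun x => x)) ++ "]")
  else
    match fallback_allowed with
    | some fb =>
        pvFirstBad airports fb (fun a =>
          "Aéroport " ++ a ++ " absent du planning pour type " ++ type_norm)
    | none => (true, "")

-- ===== PRECONDITION & SPEC =====
def Spec_is_aircraft_allowed_for_route (msn : String) (aircraft_type : String) (airports : List String) (authorizations : List (String × List (String × List String))) (fallback_allowed : Option (List String)) (out : Bool × String) : Prop := out = is_aircraft_allowed_for_route_alt msn aircraft_type airports authorizations fallback_allowed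
instance (msn : String) (aircraft_type : String) (airports : List String) (authorizations : List (String × List (String × List String))) (fallback_allowed : Option (List String)) (out : Bool × String) : Decidable (Spec_is_aircraft_allowed_for_route msn aircraft_type airports authorizations fallback_allowed out) := by unfold Spec_is_aircraft_allowed_for_route; infer_instance

-- ===== CLAIM (what is proved, stated in full; the proofs are below) =====
def Claim_equal_is_aircraft_allowed_for_route : Prop := ∀ (msn : String) (aircraft_type : String) (airports : List String) (authorizations : List (String × List (String × List String))) (fallback_allowed : Option (List String)), Dom_is_aircraft_allowed_for_route msn aircraft_type airports authorizations fallback_allowed → Spec_is_aircraft_allowed_for_route msn aircraft_type airports authorizations fallback_allowed (is_aircraft_allowed_for_route msn aircraft_type airports authorizations fallback_allowed)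

-- ===== LEMMAS AND PROOFS =====

-- A's loop returns the first failing airport of its input list (early-return characterisation)
theorem pvRouteLoop_char (msn aircraft_type : String)
    (authorizations : List (String × List (String × List String)))
    (fallback_allowed : Option (List String)) (l : List String) :
    pvRouteLoop msn aircraft_type authorizations fallback_allowed l =
      match l.find? (fun apt => !(pvIsAirportAuthorized msn aircraft_type apt authorizations fallback_allowed).1) with
      | some apt => (false, (pvIsAirportAuthorized msn aircraft_type apt authorizations fallback_allowed).2)
      | none => (true, "") := by
  induction l with
  | nil =>rfl
  | cons apt rest ih =>
      by_cases h : (pvIsAirportAuthorized msn aircraft_type apt authorizations fallback_allowed).1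
      · simp [pvRouteLoop, h, ih]
      · simp [pvRouteLoop, h]

-- the first element of sorted(xs) satisfying q is min([x for x in xs if q x])
theorem find?_sorted_eq_min?_filter (q : String → Bool) (xs : List String) :
    (PySem.List.sorted xs (fun x => x)).find? q =
      PySem.List.min? (xs.filter q) (fun x => x) := by
  rw [← List.head?_filter]
  rcases hmin : PySem.List.min? (xs.filter q) (fun x => x) with _ | m
  · rw [PySem.List.min?_eq_none_iff] at hmin
    have : ((PySem.List.sorted xs (fun x => x)).filter q).Perm (xs.filter q) :=
      (PySem.List.sorted_perm xs (fun x => x) false).filter q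
    rw [hmin] at this
    simp [List.Perm.eq_nil this]
  · have hperm : ((PySem.List.sorted xs (fun x => x)).filter q).Perm (xs.filter q) :=
      (PySem.List.sorted_perm xs (fun x => x) false).filter q
    have hmem : m ∈ (PySem.List.sorted xs (fun x => x)).filter q :=
      hperm.mem_iff.mpr (PySem.List.min?_mem hmin)
    rcases hz : (PySem.List.sorted xs (fun x => x)).filter q with _ | ⟨z, t⟩
    · rw [hz] at hmem; simp at hmem
    · have hpair : List.Pairwise (fun a b : String => a ≤ b) ((PySem.List.sorted xs (fun x => x)).filter q) :=
        List.Pairwise.sublist List.filter_sublist (PySem.List.sorted_pairwise xs (fun x => x))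
      rw [hz] at hpair hmem
      have hz_mem : z ∈ xs.filter q := hperm.mem_iff.mp (by rw [hz]; exact List.mem_cons_self ..)
      have h1 : m ≤ z := PySem.List.min?_isMin hmin z hz_mem
      have h2 : z ≤ m := by
        rcases List.mem_cons.mp hmem with h | h
        · exact le_of_eq h.symm
        · exact (List.pairwise_cons.mp hpair).1 m h
      simp [le_antisymm h1 h2]

-- one non-permissive mode: A's sorted loop equals B's filter + min
theorem mode_eq (msn aircraft_type : String)
    (authorizations : List (String × List (String × List String)))
    (fallback_allowed : Option (List String))
    (airports allowed : List String) (reason okmsg : String → String)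
    (h : ∀ apt, pvIsAirportAuthorized msn aircraft_type apt authorizations fallback_allowed =
      if allowed.contains (pvNormAirport apt) then (true, okmsg apt)
      else (false, reason (pvNormAirport apt))) :
    pvRouteLoop msn aircraft_type authorizations fallback_allowed
      (PySem.List.sorted airports (fun x => x)) =
    pvFirstBad airports allowed reason := by
  rw [pvRouteLoop_char]
  have hq : (fun apt => !(pvIsAirportAuthorized msn aircraft_type apt authorizations fallback_allowed).1)
      = fun apt => !allowed.contains (pvNormAirport apt) := by
    funext apt
    rw [h apt]
    cases hc : allowed.contains (pvNormAirport apt) <;> simp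
  rw [hq, find?_sorted_eq_min?_filter]
  simp only [pvFirstBad]
  rcases hmin : PySem.List.min? (airports.filter (fun apt => !allowed.contains (pvNormAirport apt))) (fun x => x) with _ | m
  · rfl
  · have hm : m ∈ airports.filter (fun apt => !allowed.contains (pvNormAirport apt)) :=
      PySem.List.min?_mem hmin
    have hc : allowed.contains (pvNormAirport m) = false := by
      have := (List.mem_filter.mp hm).2; simpa using this
    have hc' : pvNormAirport m ∉ allowed := by simpa using hc
    simp [h m, hc']

-- ===== VERDICT (by name: the statement is the Claim_ definition above) =====
theorem is_aircraft_allowed_for_route_spec : Claim_equal_is_aircraft_allowed_for_route := by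
  intro msn aircraft_type airports authorizations fallback_allowed _
  unfold Spec_is_aircraft_allowed_for_route
  unfold is_aircraft_allowed_for_route is_aircraft_allowed_for_route_alt
  by_cases h1 : (PySem.Dict.ofList ((PySem.Dict.ofList authorizations).getD "by_msn" [])).contains (PySem.Str.upper (PySem.Str.strip msn))
  · simp only [h1, if_true]
    exact mode_eq _ _ _ _ _ _ _
      (fun _ => "Autorisé par immatriculation (" ++ PySem.Str.upper (PySem.Str.strip msn) ++ ")")
      (fun apt => by simp [pvIsAirportAuthorized, h1, pvNormAirport])
  · by_cases h2 : (PySem.Dict.ofList ((PySem.Dict.ofList authorizations).getD "by_type" [])).contains (PySem.Str.upper (PySem.Str.strip aircraft_type))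
    · simp only [h1, h2, if_true, if_false, Bool.false_eq_true]
      exact mode_eq _ _ _ _ _ _ _
        (fun _ => "Autorisé par type (" ++ PySem.Str.upper (PySem.Str.strip aircraft_type) ++ ")")
        (fun apt => by simp [pvIsAirportAuthorized, h1, h2, pvNormAirport])
    · simp only [h1, h2, if_false, Bool.false_eq_true]
      rcases fallback_allowed with _ | fb
      · rw [pvRouteLoop_char]
        have : (fun apt => !(pvIsAirportAuthorized msn aircraft_type apt authorizations none).1)
            = fun _ => false := by
          funext apt; simp [pvIsAirportAuthorized, h1, h2]
        rw [this, List.find?_eq_none.mpr (by intro x _; simp)]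
      · exact mode_eq _ _ _ _ _ _ _ (fun _ => "Autorisé par planning (fallback)") (fun apt => by
          simp [pvIsAirportAuthorized, h1, h2, pvNormAirport])
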